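-- pv_equiv track=rewrite | github.com/phhoang2306/Job-Portal-for-student | Back-end/Additional Function/CV/cv.py | ReadLink
-- ===== SOURCE A (Python) =====
-- def ReadLink(string):
--     result = []
--     link = None
--     split_n= string.split('\n') # split '\n'
--     split_n = [string for string in split_n if string] # delete empty component
--     # Read Email
--     for link in split_n:
--         if "www." in link:
--             index = link.find("www.")
--             link = link[index:]
--             result.append(link)
--     return result
-- ===== SOURCE B (Python) =====
-- def ReadLink(string):
--     # One left-to-right scan: at the first "www." of each line, take the rest
--     # of the line and jump to its end; no split/filter/find-per-line passes.
--     result = []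
--     i = 0
--     n = len(string)
--     while i < n:
--         if string.startswith("www.", i):
--             j = string.find("\n", i)
--             if j == -1:
--                 j = n
--             result.append(string[i:j])
--             i = j
--         else:
--             i += 1
--     return result
-- ===== Notes on version B (the rewrite author's own statement) =====
-- stated objective: alternative
-- what changed: A splits the text into lines, filters out empties and runs a separate substring search per line; B is a single left-to-right scan over the whole string that, wherever a match starts, emits the rest of that line and jumps to the line end, building no intermediate line lists.
import Mathlib
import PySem

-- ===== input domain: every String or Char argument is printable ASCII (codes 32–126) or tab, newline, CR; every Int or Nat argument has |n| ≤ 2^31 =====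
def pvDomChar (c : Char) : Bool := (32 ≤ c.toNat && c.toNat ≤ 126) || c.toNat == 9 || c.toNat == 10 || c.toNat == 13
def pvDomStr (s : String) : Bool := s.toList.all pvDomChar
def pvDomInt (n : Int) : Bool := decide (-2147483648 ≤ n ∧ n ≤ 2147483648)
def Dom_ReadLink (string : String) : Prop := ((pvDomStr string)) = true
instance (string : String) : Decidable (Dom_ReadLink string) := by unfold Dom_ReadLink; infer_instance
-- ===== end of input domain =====

-- B replaces A's split/filter/per-line-find passes by a single left-to-right scan; return values are proved equal (objective: alternative).

-- ===== PORT A =====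
def ReadLink (string : String) : List String :=
  let split_n := (PySem.Str.split? string "\n").getD []   -- sep "\n" is nonempty, so split? is always `some`
  let split_n := split_n.filter (fun s => s ≠ "")
  split_n.foldl (fun result link =>
    if PySem.Str.isIn "www." link then
      result ++ [PySem.Str.slice link (some (PySem.Str.find link "www.")) none]
    else result) []

-- ===== PORT B =====
-- the while loop of Source B as structural recursion on the remaining characters
def ReadLinkAltGo : List Char → List String
  | [] => []
  | c :: rest =>
    if PySem.Chars.startswith (c :: rest) ['w','w','w','.'] then
      String.ofList ((c :: rest).takeWhile (· ≠ '\n')) :: ReadLinkAltGo (rest.dropWhile (· ≠ '\n'))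
    else
      ReadLinkAltGo rest
termination_by l => l.length
decreasing_by
  · simpa using Nat.lt_succ_of_le (List.length_dropWhile_le _ rest)
  · simp

def ReadLink_alt (string : String) : List String := ReadLinkAltGo string.toList

-- ===== PRECONDITION & SPEC =====
def Spec_ReadLink (string : String) (out : List String) : Prop := out = ReadLink_alt string
instance (string : String) (out : List String) : Decidable (Spec_ReadLink string out) := by unfold Spec_ReadLink; infer_instance

-- ===== CLAIM (what is proved, stated in full; the proofs are below) =====
def Claim_equal_ReadLink : Prop := ∀ (string : String), Dom_ReadLink string → Spec_ReadLink string (ReadLink string)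

-- ===== LEMMAS AND PROOFS =====

-- the lines of a char list split at '\n' (reference shape of Python's split('\n'))
def pvLines (l : List Char) : List (List Char) :=
  l.takeWhile (· ≠ '\n') ::
    (if (l.dropWhile (· ≠ '\n')).isEmpty then [] else pvLines (l.dropWhile (· ≠ '\n')).tail)
termination_by l.length
decreasing_by
  have hle := List.length_dropWhile_le (fun c => decide (c ≠ '\n')) l
  rename_i hne
  simp only [List.isEmpty_iff] at hne
  have : (List.dropWhile (fun c => decide (c ≠ '\n')) l).tail.length <
      (List.dropWhile (fun c => decide (c ≠ '\n')) l).length := by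
    cases hd : List.dropWhile (fun c => decide (c ≠ '\n')) l with
    | nil => exact absurd hd hne
    | cons a t => simp
  omega

def pvWWW : List Char := ['w','w','w','.']

-- A's per-line processing: keep lines containing "www.", sliced from the first hit
def pvProc (ls : List (List Char)) : List String :=
  (ls.filter (fun cs => PySem.Chars.isIn pvWWW cs)).map
    (fun cs => String.ofList (cs.drop (PySem.Chars.find cs pvWWW).toNat))

theorem pvLines_def (l : List Char) : pvLines l =
    l.takeWhile (· ≠ '\n') ::
      (if (l.dropWhile (· ≠ '\n')).isEmpty then [] else pvLines (l.dropWhile (· ≠ '\n')).tail) := by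
  rw [pvLines]

theorem pvLines_nil : pvLines [] = [[]] := by rw [pvLines_def]; rfl

theorem pvLines_newline (rest : List Char) : pvLines ('\n' :: rest) = [] :: pvLines rest := by
  rw [pvLines_def ('\n' :: rest)]
  have h1 : List.takeWhile (fun x => decide (x ≠ '\n')) ('\n' :: rest) = [] := by
    rw [List.takeWhile_cons]; simp
  have h2 : List.dropWhile (fun x => decide (x ≠ '\n')) ('\n' :: rest) = '\n' :: rest := by
    rw [List.dropWhile_cons]; simp
  rw [h1, h2]
  simp

theorem pvLines_cons_ne {c : Char} (rest : List Char) (hc : c ≠ '\n') :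
    pvLines (c :: rest) = (c :: (pvLines rest).headI) :: (pvLines rest).tail := by
  rw [pvLines_def (c :: rest), pvLines_def rest]
  have h1 : List.takeWhile (fun x => decide (x ≠ '\n')) (c :: rest)
      = c :: List.takeWhile (fun x => decide (x ≠ '\n')) rest := by
    rw [List.takeWhile_cons]; simp [hc]
  have h2 : List.dropWhile (fun x => decide (x ≠ '\n')) (c :: rest)
      = List.dropWhile (fun x => decide (x ≠ '\n')) rest := by
    rw [List.dropWhile_cons]; simp [hc]
  rw [h1, h2]
  rfl

theorem pvLines_cons_eq (l : List Char) : pvLines l = (pvLines l).headI :: (pvLines l).tail := by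
  rw [pvLines_def]; rfl

theorem pv_splitOn_go_spec : ∀ (fuel : Nat) (l cur : List Char) (acc : List (List Char)),
    l.length < fuel →
    PySem.Chars.splitOn.go ['\n'] fuel l cur acc =
      acc.reverse ++ (cur.reverse ++ (pvLines l).headI) :: (pvLines l).tail
  | fuel+1, [], cur, acc, h => by
      simp [PySem.Chars.splitOn.go, pvLines_nil]
  | fuel+1, c :: rest, cur, acc, h => by
      by_cases hc : c = '\n'
      · subst hc
        have hstep : PySem.Chars.splitOn.go ['\n'] (fuel+1) ('\n' :: rest) cur acc
            = PySem.Chars.splitOn.go ['\n'] fuel rest [] (cur.reverse :: acc) := by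
          simp [PySem.Chars.splitOn.go, List.isPrefixOf]
        rw [hstep, pv_splitOn_go_spec fuel rest [] _ (by simpa using h), pvLines_newline]
        rw [pvLines_cons_eq rest]
        simp
      · have hstep : PySem.Chars.splitOn.go ['\n'] (fuel+1) (c :: rest) cur acc
            = PySem.Chars.splitOn.go ['\n'] fuel rest (c :: cur) acc := by
          simp [PySem.Chars.splitOn.go, List.isPrefixOf, beq_iff_eq, Ne.symm hc]
        rw [hstep, pv_splitOn_go_spec fuel rest _ _ (by simpa using h), pvLines_cons_ne rest hc]
        simp

theorem pv_lines_eq (l : List Char) : PySem.Chars.splitOn l ['\n'] = pvLines l := by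
  have h := pv_splitOn_go_spec (l.length + 1) l [] [] (by omega)
  simp only [List.reverse_nil, List.nil_append] at h
  rw [PySem.Chars.splitOn, h, ← pvLines_cons_eq l]

theorem pv_find_go_offset : ∀ (l : List Char) (k : Nat),
    PySem.Chars.find.go pvWWW l k =
      if PySem.Chars.find.go pvWWW l 0 = -1 then -1 else k + PySem.Chars.find.go pvWWW l 0
  | [], k => by simp [PySem.Chars.find.go, pvWWW]
  | c :: t, k => by
      by_cases hp : pvWWW.isPrefixOf (c :: t)
      · simp [PySem.Chars.find.go, hp]
      · have hne : (PySem.Chars.find.go pvWWW (c :: t) k) = PySem.Chars.find.go pvWWW t (k+1) := by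
          simp [PySem.Chars.find.go, hp]
        have h0 : (PySem.Chars.find.go pvWWW (c :: t) 0) = PySem.Chars.find.go pvWWW t 1 := by
          simp [PySem.Chars.find.go, hp]
        have hdisj : PySem.Chars.find t pvWWW = -1 ∨ 0 ≤ PySem.Chars.find t pvWWW := by
          by_cases h : PySem.Chars.find t pvWWW = -1
          · exact Or.inl h
          · exact Or.inr ((PySem.Chars.find_nonneg_iff t pvWWW).mpr
              ((PySem.Chars.find_ne_neg_one_iff t pvWWW).mp h))
        have hfind : PySem.Chars.find t pvWWW = PySem.Chars.find.go pvWWW t 0 := rfl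
        rw [hne, h0, pv_find_go_offset t (k+1), pv_find_go_offset t 1]
        rw [hfind] at hdisj
        split_ifs <;> omega

theorem pv_find_prefix {l : List Char} (h : pvWWW.isPrefixOf l = true) :
    PySem.Chars.find l pvWWW = 0 := by
  cases l with
  | nil => simp [pvWWW] at h
  | cons c t => simp [PySem.Chars.find, PySem.Chars.find.go, h]

theorem pv_find_cons_ne {c : Char} {t : List Char} (h : ¬ pvWWW.isPrefixOf (c :: t) = true) :
    PySem.Chars.find (c :: t) pvWWW =
      if PySem.Chars.find t pvWWW = -1 then -1 else 1 + PySem.Chars.find t pvWWW := by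
  have hstep : PySem.Chars.find (c :: t) pvWWW = PySem.Chars.find.go pvWWW t 1 := by
    simp [PySem.Chars.find, PySem.Chars.find.go, h]
  rw [hstep, pv_find_go_offset t 1]
  rfl

theorem pv_prefix_takeWhile {l : List Char} (h : pvWWW.isPrefixOf l = true) :
    pvWWW.isPrefixOf (l.takeWhile (· ≠ '\n')) = true := by
  obtain ⟨s, rfl⟩ := List.isPrefixOf_iff_prefix.mp h
  simp [pvWWW, List.isPrefixOf]

theorem pv_isIn_nil : PySem.Chars.isIn pvWWW [] = false := by decide

theorem pvProc_cons (X : List Char) (T : List (List Char)) :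
    pvProc (X :: T) =
      if PySem.Chars.isIn pvWWW X then
        String.ofList (X.drop (PySem.Chars.find X pvWWW).toNat) :: pvProc T
      else pvProc T := by
  simp only [pvProc, List.filter_cons]
  split_ifs with h
  · simp
  · simp

theorem pv_dropWhile_head {p : Char → Bool} : ∀ {l : List Char} {d : Char} {t : List Char},
    l.dropWhile p = d :: t → p d = false
  | [], d, t, h => by simp at h
  | x :: xs, d, t, h => by
      rw [List.dropWhile_cons] at h
      by_cases hx : p x
      · rw [if_pos hx] at h
        exact pv_dropWhile_head h
      · rw [if_neg hx] at h
        cases h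
        simpa using hx

theorem pv_main : ∀ l : List Char, ReadLinkAltGo l = pvProc (pvLines l)
  | [] => by
      rw [ReadLinkAltGo, pvLines_nil, pvProc_cons]
      simp [pv_isIn_nil, pvProc]
  | c :: rest => by
      rw [ReadLinkAltGo]
      by_cases hsw : PySem.Chars.startswith (c :: rest) ['w','w','w','.']
      · rw [if_pos hsw]
        have hpre : pvWWW.isPrefixOf (c :: rest) = true := hsw
        have hc : c = 'w' := by
          simp [pvWWW, List.isPrefixOf] at hpre
          exact hpre.1.symm
        have hcne : c ≠ '\n' := by rw [hc]; decide
        have hlinepre : pvWWW.isPrefixOf ((c :: rest).takeWhile (· ≠ '\n')) = true :=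
          pv_prefix_takeWhile hpre
        have hfind0 : PySem.Chars.find ((c :: rest).takeWhile (· ≠ '\n')) pvWWW = 0 :=
          pv_find_prefix hlinepre
        have hisin : PySem.Chars.isIn pvWWW ((c :: rest).takeWhile (· ≠ '\n')) = true := by
          unfold PySem.Chars.isIn
          rw [hfind0]
          decide
        have hdw : List.dropWhile (fun x => decide (x ≠ '\n')) (c :: rest)
            = List.dropWhile (fun x => decide (x ≠ '\n')) rest := by
          rw [List.dropWhile_cons]; simp [hcne]
        cases hd : List.dropWhile (fun x => decide (x ≠ '\n')) rest with
        | nil =>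
            rw [pvLines_def (c :: rest)]
            rw [show (List.dropWhile (fun x => decide (x ≠ '\n')) (c :: rest)) = [] from hdw.trans hd]
            simp only [List.isEmpty_nil, if_pos]
            rw [pvProc_cons, if_pos hisin, hfind0]
            simp [ReadLinkAltGo, pvProc]
        | cons d t =>
            have hdn : d = '\n' := by
              have hpd := pv_dropWhile_head hd
              simpa using hpd
            rw [pvLines_def (c :: rest)]
            rw [show (List.dropWhile (fun x => decide (x ≠ '\n')) (c :: rest)) = d :: t from hdw.trans hd]
            simp only [List.isEmpty_cons, if_neg Bool.false_ne_true, List.tail_cons]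
            rw [pvProc_cons, if_pos hisin, hfind0]
            have hstep2 : ReadLinkAltGo (d :: t) = ReadLinkAltGo t := by
              rw [ReadLinkAltGo, if_neg]
              rw [hdn]
              simp [PySem.Chars.startswith, List.isPrefixOf]
            have hlt : t.length < rest.length + 1 := by
              have hle := List.length_dropWhile_le (fun x => decide (x ≠ '\n')) rest
              rw [hd] at hle
              simp at hle
              omega
            rw [hstep2, pv_main t]
            simp
      · rw [if_neg hsw]
        rw [pv_main rest]
        by_cases hc : c = '\n'
        · subst hc
          rw [pvLines_newline, pvProc_cons, if_neg (by rw [pv_isIn_nil]; simp)]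
        · have hB : (pvLines rest).headI = rest.takeWhile (· ≠ '\n') := by rw [pvLines_def]; rfl
          rw [pvLines_cons_ne rest hc]
          conv_lhs => rw [pvLines_cons_eq rest]
          rw [pvProc_cons, pvProc_cons, hB]
          have hnp : ¬ pvWWW.isPrefixOf (c :: rest.takeWhile (· ≠ '\n')) = true := by
            intro hcb
            have h1 : (c :: rest.takeWhile (· ≠ '\n')) <+: (c :: rest) :=
              List.cons_prefix_cons.mpr ⟨rfl, List.takeWhile_prefix _⟩
            have h2 : pvWWW <+: (c :: rest) := (List.isPrefixOf_iff_prefix.mp hcb).trans h1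
            have h3 : PySem.Chars.startswith (c :: rest) ['w','w','w','.'] = true :=
              List.isPrefixOf_iff_prefix.mpr h2
            exact hsw h3
          have hfind := pv_find_cons_ne hnp
          by_cases hf : PySem.Chars.find (rest.takeWhile (· ≠ '\n')) pvWWW = -1
          · have e1 : PySem.Chars.isIn pvWWW (c :: rest.takeWhile (· ≠ '\n')) = false := by
              unfold PySem.Chars.isIn
              rw [hfind, if_pos hf]
              decide
            have e2 : PySem.Chars.isIn pvWWW (rest.takeWhile (· ≠ '\n')) = false := by
              unfold PySem.Chars.isIn
              rw [hf]
              decide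
            rw [e1, e2]
            simp
          · have hge : 0 ≤ PySem.Chars.find (rest.takeWhile (· ≠ '\n')) pvWWW :=
              (PySem.Chars.find_nonneg_iff _ _).mpr ((PySem.Chars.find_ne_neg_one_iff _ _).mp hf)
            have e1 : PySem.Chars.isIn pvWWW (c :: rest.takeWhile (· ≠ '\n')) = true := by
              unfold PySem.Chars.isIn
              rw [hfind, if_neg hf, bne_iff_ne]
              omega
            have e2 : PySem.Chars.isIn pvWWW (rest.takeWhile (· ≠ '\n')) = true := by
              unfold PySem.Chars.isIn
              rw [bne_iff_ne]
              exact hf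
            rw [e1, e2]
            simp only [if_pos]
            rw [hfind, if_neg hf]
            have htn : ((1 : Int) + PySem.Chars.find (rest.takeWhile (· ≠ '\n')) pvWWW).toNat
                = (PySem.Chars.find (rest.takeWhile (· ≠ '\n')) pvWWW).toNat + 1 := by omega
            rw [htn]
            simp
termination_by l => l.length
decreasing_by
  · simpa using hlt
  · simp

theorem pv_A_list : ∀ L : List (List Char),
    (((L.map String.ofList).filter (fun s => s ≠ "")).filter
        (fun link => PySem.Str.isIn "www." link)).map
      (fun link => PySem.Str.slice link (some (PySem.Str.find link "www.")) none) = pvProc L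
  | [] => by simp [pvProc]
  | cs :: L => by
      simp only [List.map_cons, List.filter_cons]
      by_cases hcs : cs = []
      · subst hcs
        have h0 : (decide ((String.ofList ([] : List Char)) ≠ "")) = false := by decide
        rw [h0]
        simp only [Bool.false_eq_true, if_false]
        rw [pvProc_cons, if_neg (by rw [pv_isIn_nil]; simp)]
        exact pv_A_list L
      · have h0 : (decide ((String.ofList cs) ≠ "")) = true := by
          simp only [decide_eq_true_eq]
          intro h
          apply hcs
          have := congrArg String.toList h
          simpa using this
        rw [h0, if_pos rfl]
        have hIs : PySem.Str.isIn "www." (String.ofList cs) = PySem.Chars.isIn pvWWW cs := by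
          rw [PySem.Str.isIn_eq]
          simp only [String.toList_ofList]
          rfl
        rw [List.filter_cons, hIs, pvProc_cons]
        by_cases hin : PySem.Chars.isIn pvWWW cs = true
        · rw [if_pos hin, if_pos hin, List.map_cons, pv_A_list L]
          congr 1
          have hfind : PySem.Str.find (String.ofList cs) "www." = PySem.Chars.find cs pvWWW := by
            rw [PySem.Str.find_eq]
            simp only [String.toList_ofList]
            rfl
          have hge : 0 ≤ PySem.Chars.find cs pvWWW := by
            unfold PySem.Chars.isIn at hin
            rw [bne_iff_ne] at hin
            exact (PySem.Chars.find_nonneg_iff _ _).mpr ((PySem.Chars.find_ne_neg_one_iff _ _).mp hin)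
          rw [hfind, PySem.Str.slice]
          simp only [String.toList_ofList]
          rw [PySem.Chars.slice_eq_listSlice, PySem.List.slice_from _ hge]
        · rw [if_neg hin, if_neg hin]
          exact pv_A_list L

theorem pv_A_eq (string : String) : ReadLink string = pvProc (pvLines string.toList) := by
  unfold ReadLink
  have hsplit : (PySem.Str.split? string "\n").getD [] = (pvLines string.toList).map String.ofList := by
    rw [PySem.Str.split?]
    have hs : PySem.Chars.split? string.toList "\n".toList
        = some (PySem.Chars.splitOn string.toList ['\n']) := by
      rw [PySem.Chars.split?]
      rfl
    rw [hs, pv_lines_eq]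
    rfl
  rw [hsplit]
  rw [PySem.List.foldl_append_if (fun link => PySem.Str.isIn "www." link)
    (fun link => PySem.Str.slice link (some (PySem.Str.find link "www.")) none)]
  rw [List.nil_append]
  exact pv_A_list (pvLines string.toList)

theorem ReadLink_spec : Claim_equal_ReadLink := by
  intro string _
  unfold Spec_ReadLink ReadLink_alt
  rw [pv_A_eq, pv_main]
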